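-- pv_equiv track=rewrite | github.com/tis226/Paddle_OCR_Question_for_med | evaluate_answers.py | evaluate
-- ===== SOURCE A (Python) =====
-- from typing import Dict, Iterable, Optional, Tuple
--
-- ChoiceKey = Tuple[str, int]
--
-- def evaluate(predictions: Dict[ChoiceKey, str], answer_key: Dict[ChoiceKey, str]):
--     correct = 0
--     for key, correct_choice in answer_key.items():
--         if predictions.get(key) == correct_choice:
--             correct += 1
--     total = len(answer_key)
--     incorrect = total - correct
--     return correct, incorrect, total
-- ===== SOURCE B (Python) =====
-- def evaluate(predictions, answer_key):
--     total = len(answer_key)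
--     p = sorted(predictions.items())
--     a = sorted(answer_key.items())
--     i = j = 0
--     correct = 0
--     while i < len(p) and j < len(a):
--         if p[i] < a[j]:
--             i += 1
--         elif a[j] < p[i]:
--             j += 1
--         else:
--             correct += 1
--             i += 1
--             j += 1
--     return correct, total - correct, total
-- ===== Notes on version B (the rewrite author's own statement) =====
-- stated objective: alternative
-- what changed: Replaces the per-key hashed-lookup counting loop with sort-then-merge: both item lists are sorted and a two-pointer merge scan counts the common items.
import Mathlib
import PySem

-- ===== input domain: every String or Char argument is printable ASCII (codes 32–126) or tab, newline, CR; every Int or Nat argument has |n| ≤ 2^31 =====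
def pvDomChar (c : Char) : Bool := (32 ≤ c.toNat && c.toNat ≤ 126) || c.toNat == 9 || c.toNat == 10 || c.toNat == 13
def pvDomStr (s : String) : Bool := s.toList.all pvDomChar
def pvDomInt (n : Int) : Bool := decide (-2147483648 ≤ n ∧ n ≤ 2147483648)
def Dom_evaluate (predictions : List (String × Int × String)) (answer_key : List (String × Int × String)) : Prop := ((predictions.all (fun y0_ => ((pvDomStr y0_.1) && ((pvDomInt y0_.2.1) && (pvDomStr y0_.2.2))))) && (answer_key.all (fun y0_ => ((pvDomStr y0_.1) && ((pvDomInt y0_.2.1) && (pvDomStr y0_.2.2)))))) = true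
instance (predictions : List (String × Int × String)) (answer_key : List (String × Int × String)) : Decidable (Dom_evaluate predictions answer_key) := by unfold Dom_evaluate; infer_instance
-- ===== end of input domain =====

-- B replaces A's per-key hashed lookup loop by sorting both item lists and counting
-- common items with a single two-pointer merge scan (alternative algorithm, same result).

-- ===== PORT A =====
-- predictions.get(key): first entry whose (str, int) key matches (association-list lookup)
def pvGetPred (predictions : List (String × Int × String)) (k : String × Int) : Option String :=
  match predictions.find? (fun e => e.1 == k.1 && e.2.1 == k.2) with
  | some e => some e.2.2
  | none => none

def evaluate (predictions : List (String × Int × String)) (answer_key : List (String × Int × String)) : Int × Int × Int :=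
  let correct : Int := answer_key.foldl
    (fun c e => if pvGetPred predictions (e.1, e.2.1) = some e.2.2 then c + 1 else c) 0
  let total : Int := answer_key.length
  (correct, total - correct, total)

-- ===== PORT B =====
-- Python's lexicographic comparison of the item tuple ((s, i), v) is exactly the
-- lexicographic product order on String ×ₗ Int ×ₗ String via this re-bracketing.
def pvKey (e : String × Int × String) : String ×ₗ Int ×ₗ String :=
  toLex (e.1, toLex (e.2.1, e.2.2))

-- the while loop: two pointers over the two sorted lists, counter c
def pvMergeLoop : List (String × Int × String) → List (String × Int × String) → Int → Int
  | [], _, c => c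
  | _ :: _, [], c => c
  | x :: p, y :: a, c =>
      if pvKey x < pvKey y then pvMergeLoop p (y :: a) c
      else if pvKey y < pvKey x then pvMergeLoop (x :: p) a c
      else pvMergeLoop p a (c + 1)
  termination_by p a _ => p.length + a.length

def evaluate_alt (predictions : List (String × Int × String)) (answer_key : List (String × Int × String)) : Int × Int × Int :=
  let total : Int := answer_key.length
  let p := PySem.List.sorted predictions pvKey false
  let a := PySem.List.sorted answer_key pvKey false
  let correct : Int := pvMergeLoop p a 0
  (correct, total - correct, total)

-- ===== PRECONDITION & SPEC =====
-- The association lists stand for Python dicts, so Pre_ requires the (str, int) keys within each list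
-- to be distinct; a list with duplicate keys is not a valid dict representation.
def Pre_evaluate (predictions : List (String × Int × String)) (answer_key : List (String × Int × String)) : Prop :=
  (predictions.map (fun e => (e.1, e.2.1))).Nodup ∧ (answer_key.map (fun e => (e.1, e.2.1))).Nodup
instance (predictions : List (String × Int × String)) (answer_key : List (String × Int × String)) : Decidable (Pre_evaluate predictions answer_key) := by unfold Pre_evaluate; infer_instance

def pvWitness_evaluate : (List (String × Int × String)) × (List (String × Int × String)) :=
  ([("a", 1, "x"), ("b", 2, "y")], [("a", 1, "x"), ("b", 2, "z"), ("c", 3, "w")])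

def Spec_evaluate (predictions : List (String × Int × String)) (answer_key : List (String × Int × String)) (out : Int × Int × Int) : Prop := out = evaluate_alt predictions answer_key
instance (predictions : List (String × Int × String)) (answer_key : List (String × Int × String)) (out : Int × Int × Int) : Decidable (Spec_evaluate predictions answer_key out) := by unfold Spec_evaluate; infer_instance

-- ===== CLAIM (what is proved, stated in full; the proofs are below) =====
def Claim_equal_evaluate : Prop := ∀ (predictions : List (String × Int × String)) (answer_key : List (String × Int × String)), Dom_evaluate predictions answer_key → Pre_evaluate predictions answer_key → Spec_evaluate predictions answer_key (evaluate predictions answer_key)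

-- ===== LEMMAS AND PROOFS =====

theorem pvKey_injective : Function.Injective pvKey := by
  intro x y h
  obtain ⟨x1, x2, x3⟩ := x; obtain ⟨y1, y2, y3⟩ := y
  simp only [pvKey, toLex] at h
  simp_all

-- lookup succeeds with the entry's own value iff the whole entry is in the (key-nodup) list
theorem pvGetPred_iff_mem (predictions : List (String × Int × String))
    (hp : (predictions.map (fun e => (e.1, e.2.1))).Nodup) (e : String × Int × String) :
    pvGetPred predictions (e.1, e.2.1) = some e.2.2 ↔ e ∈ predictions := by
  induction predictions with
  | nil => simp [pvGetPred]
  | cons a l ih =>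
    simp only [List.map_cons, List.nodup_cons] at hp
    by_cases hk : a.1 = e.1 ∧ a.2.1 = e.2.1
    · have hfind : pvGetPred (a :: l) (e.1, e.2.1) = some a.2.2 := by
        simp [pvGetPred, List.find?, hk.1, hk.2]
      rw [hfind]
      constructor
      · rintro h
        have : a = e := by
          obtain ⟨a1, a2, a3⟩ := a; obtain ⟨e1, e2, e3⟩ := e
          simp_all
        simp [this]
      · intro hmem
        rcases List.mem_cons.mp hmem with h | h
        · simp [h]
        · exact absurd (List.mem_map.mpr ⟨e, h, by simp [hk.1, hk.2]⟩) hp.1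
    · have hfind : pvGetPred (a :: l) (e.1, e.2.1) = pvGetPred l (e.1, e.2.1) := by
        simp only [pvGetPred, List.find?]
        have : (a.1 == e.1 && a.2.1 == e.2.1) = false := by
          simp only [Bool.and_eq_false_iff, beq_eq_false_iff_ne]
          by_cases h1 : a.1 = e.1
          · exact Or.inr (fun h2 => hk ⟨h1, h2⟩)
          · exact Or.inl h1
        rw [this]
      rw [hfind, ih hp.2]
      constructor
      · exact fun h => List.mem_cons_of_mem _ h
      · intro hmem
        rcases List.mem_cons.mp hmem with h | h
        · exact absurd ⟨(congrArg (fun x => x.1) h).symm, (congrArg (fun x => x.2.1) h).symm⟩ hk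
        · exact h

-- the counting loop is countP
theorem foldl_count_eq_countP (p : (String × Int × String) → Prop) [DecidablePred p]
    (l : List (String × Int × String)) (c : Int) :
    l.foldl (fun c e => if p e then c + 1 else c) c = c + l.countP (fun e => decide (p e)) := by
  induction l generalizing c with
  | nil => simp
  | cons a l ih =>
    simp only [List.foldl_cons, List.countP_cons, ih]
    split_ifs with h h2 h3 <;> (simp_all; try ring)

-- drop a head element not occurring in l from the membership count
theorem countP_mem_cons_eq (x : String × Int × String) (p l : List (String × Int × String))
    (hx : ∀ z ∈ l, z ≠ x) :
    l.countP (fun z => decide (z ∈ x :: p)) = l.countP (fun z => decide (z ∈ p)) := by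
  apply List.countP_congr
  intro z hz
  simp only [decide_eq_true_eq, List.mem_cons]
  have := hx z hz
  tauto

-- the merge scan over strictly key-sorted lists counts the elements of a that also lie in p
theorem pvMergeLoop_eq_countP (p a : List (String × Int × String)) (c : Int)
    (hp : p.Pairwise (fun x y => pvKey x < pvKey y))
    (ha : a.Pairwise (fun x y => pvKey x < pvKey y)) :
    pvMergeLoop p a c = c + a.countP (fun y => decide (y ∈ p)) := by
  induction hn : p.length + a.length using Nat.strong_induction_on generalizing p a c with
  | _ n ih =>
    match p, a with
    | [], a =>
      simp [pvMergeLoop]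
    | x :: p, [] => simp [pvMergeLoop]
    | x :: p, y :: a =>
      have hpx : ∀ z ∈ p, pvKey x < pvKey z := fun z hz => (List.pairwise_cons.mp hp).1 z hz
      have hay : ∀ z ∈ a, pvKey y < pvKey z := fun z hz => (List.pairwise_cons.mp ha).1 z hz
      have hp' := (List.pairwise_cons.mp hp).2
      have ha' := (List.pairwise_cons.mp ha).2
      by_cases h1 : pvKey x < pvKey y
      · rw [pvMergeLoop, if_pos h1,
          ih (p.length + (y :: a).length) (by simp at hn ⊢; omega) p (y :: a) c hp' ha rfl]
        have hx : ∀ z ∈ y :: a, z ≠ x := by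
          intro z hz he
          rcases List.mem_cons.mp hz with h | h
          · exact absurd (congrArg pvKey he) (ne_of_gt (h ▸ h1))
          · exact absurd (congrArg pvKey he) (ne_of_gt (h1.trans (hay z h)))
        rw [countP_mem_cons_eq x p (y :: a) hx]
      · by_cases h2 : pvKey y < pvKey x
        · rw [pvMergeLoop, if_neg h1, if_pos h2,
            ih ((x :: p).length + a.length) (by simp at hn ⊢; omega) (x :: p) a c hp ha' rfl]
          have hy1 : y ≠ x := fun h => absurd (congrArg pvKey h) (ne_of_lt h2)
          have hy2 : y ∉ p := fun h => lt_asymm h2 (hpx y h)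
          simp [hy1, hy2]
        · have hxy : x = y := pvKey_injective (le_antisymm (not_lt.mp h2) (not_lt.mp h1))
          rw [pvMergeLoop, if_neg h1, if_neg h2,
            ih (p.length + a.length) (by simp at hn ⊢; omega) p a (c + 1) hp' ha' rfl]
          have hx : ∀ z ∈ a, z ≠ x := by
            intro z hz he
            exact absurd (congrArg pvKey he) (ne_of_gt (hxy ▸ hay z hz))
          have hyx : (y ∈ x :: p) := by simp [hxy]
          rw [List.countP_cons, countP_mem_cons_eq x p a hx, if_pos (by simp [hyx])]
          push_cast
          ring

-- sorted + nodup ⇒ strictly key-sorted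
theorem sorted_pairwise_lt (l : List (String × Int × String)) (hnd : l.Nodup) :
    (PySem.List.sorted l pvKey false).Pairwise (fun x y => pvKey x < pvKey y) := by
  have hle := PySem.List.sorted_pairwise (xs := l) (key := pvKey)
  have hnd' : (PySem.List.sorted l pvKey false).Nodup :=
    (PySem.List.sorted_perm l pvKey false).nodup_iff.mpr hnd
  have := hle.and hnd'
  exact this.imp (fun {x y} h => lt_of_le_of_ne h.1 (fun he => h.2 (pvKey_injective he)))

-- ===== VERDICT (by name: the statement is the Claim_ definition above) =====
theorem evaluate_spec : Claim_equal_evaluate := by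
  intro predictions answer_key _ hpre
  obtain ⟨hp, ha⟩ := hpre
  unfold Spec_evaluate evaluate evaluate_alt
  have hpnodup : predictions.Nodup := hp.of_map
  have hanodup : answer_key.Nodup := ha.of_map
  have hmerge :
      pvMergeLoop (PySem.List.sorted predictions pvKey false) (PySem.List.sorted answer_key pvKey false) 0
        = (0 : Int) + (PySem.List.sorted answer_key pvKey false).countP
            (fun y => decide (y ∈ PySem.List.sorted predictions pvKey false)) :=
    pvMergeLoop_eq_countP _ _ 0 (sorted_pairwise_lt _ hpnodup) (sorted_pairwise_lt _ hanodup)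
  have hcnt :
      (PySem.List.sorted answer_key pvKey false).countP
          (fun y => decide (y ∈ PySem.List.sorted predictions pvKey false))
        = answer_key.countP (fun y => decide (y ∈ predictions)) := by
    rw [(PySem.List.sorted_perm answer_key pvKey false).countP_eq]
    apply List.countP_congr
    intro z _
    simp [PySem.List.mem_sorted]
  have hfold :
      answer_key.foldl (fun c e => if pvGetPred predictions (e.1, e.2.1) = some e.2.2 then c + 1 else c) (0 : Int)
        = (0 : Int) + answer_key.countP (fun y => decide (y ∈ predictions)) := by
    rw [foldl_count_eq_countP (p := fun e => pvGetPred predictions (e.1, e.2.1) = some e.2.2)]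
    congr 1
    exact_mod_cast List.countP_congr
      (fun z _ => by simp [pvGetPred_iff_mem predictions hp z])
  simp only [hmerge, hcnt, hfold]
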